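-- pv_equiv track=rewrite | github.com/SuperInstance/spreadsheet-moment-proto | simulations/novel/topology/simplicial_complexes.py | verify_nerve_theorem
-- ===== SOURCE A (Python) =====
-- from typing import List, Set, Tuple, Dict, Optional, Any
-- from itertools import combinations, chain
--
-- def verify_nerve_theorem(cover_sets: List[Set[Any]]) -> bool:
--     """
--     Verify nerve theorem conditions for a cover.
--
--     The nerve theorem states that if {U_i} is a good cover (all finite
--     intersections are contractible), then Nerve({U_i}) ≃ ∪ U_i.
--
--     Args:
--         cover_sets: List of sets in the cover
--
--     Returns:
--         True if cover is good (contractible intersections), False otherwise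
--     """
--     # Check all finite intersections
--     for k in range(1, len(cover_sets) + 1):
--         for subset in combinations(range(len(cover_sets)), k):
--             intersection = set.intersection(
--                 *[cover_sets[i] for i in subset]
--             )
--
--             # Check if intersection is contractible
--             # For discrete sets, contractible means empty or single point
--             if len(intersection) > 1:
--                 return False  # Not contractible
--
--     return True
-- ===== SOURCE B (Python) =====
-- def verify_nerve_theorem(cover_sets):
--     # A set's intersection with anything is a subset of itself, so every
--     # finite intersection is contractible iff every single cover set is.
--     return all(len(set(s)) <= 1 for s in cover_sets)
-- ===== Notes on version B (the rewrite author's own statement) =====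
-- stated objective: faster
-- what changed: Instead of enumerating all 2^n-1 nonempty index subsets and intersecting, B checks only that each individual cover set has at most one element, which is equivalent since every intersection is a subset of each participating set.
import Mathlib
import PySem

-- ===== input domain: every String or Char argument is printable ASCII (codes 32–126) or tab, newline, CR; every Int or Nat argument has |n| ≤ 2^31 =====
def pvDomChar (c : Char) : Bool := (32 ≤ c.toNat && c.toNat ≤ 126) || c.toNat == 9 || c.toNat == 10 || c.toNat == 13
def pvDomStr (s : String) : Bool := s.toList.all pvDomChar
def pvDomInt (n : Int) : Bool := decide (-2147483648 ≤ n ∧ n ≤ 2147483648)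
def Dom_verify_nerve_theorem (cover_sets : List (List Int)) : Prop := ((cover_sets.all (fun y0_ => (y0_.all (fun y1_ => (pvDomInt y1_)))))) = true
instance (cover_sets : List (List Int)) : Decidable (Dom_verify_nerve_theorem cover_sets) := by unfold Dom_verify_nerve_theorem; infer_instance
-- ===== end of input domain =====

-- B replaces A's enumeration of all nonempty index subsets by a single pass
-- checking each cover set alone (every intersection is a subset of each member).

-- ===== PORT A =====
-- itertools.combinations(xs, k), in itertools order (each inner list is a Python set,
-- modelled as the list of its distinct elements via PySem.Set)
def pvCombos : List Nat → Nat → List (List Nat)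
  | _, 0 => [[]]
  | [], _ + 1 => []
  | x :: xs, k + 1 => (pvCombos xs k).map (x :: ·) ++ pvCombos xs (k + 1)

-- set.intersection(*[cover_sets[i] for i in subset]): elements of the first chosen set
-- lying in every other chosen set (subset's indices are always in range, so getD is exact)
def pvInter (cover : List (List Int)) : List Nat → List Int
  | [] => []
  | i :: rest =>
      (PySem.Set.ofList (cover.getD i [])).filter
        (fun x => rest.all (fun j => (cover.getD j []).contains x))

def verify_nerve_theorem (cover_sets : List (List Int)) : Bool :=
  -- for k in range(1, len+1): for subset in combinations: if len(intersection) > 1: return False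
  !((List.range' 1 cover_sets.length).any (fun k =>
      (pvCombos (List.range cover_sets.length) k).any (fun subset =>
        decide (1 < (pvInter cover_sets subset).length))))

-- ===== PORT B =====
def verify_nerve_theorem_alt (cover_sets : List (List Int)) : Bool :=
  cover_sets.all (fun s => decide ((PySem.Set.ofList s).length ≤ 1))

-- ===== PRECONDITION & SPEC =====
def Spec_verify_nerve_theorem (cover_sets : List (List Int)) (out : Bool) : Prop := out = verify_nerve_theorem_alt cover_sets
instance (cover_sets : List (List Int)) (out : Bool) : Decidable (Spec_verify_nerve_theorem cover_sets out) := by unfold Spec_verify_nerve_theorem; infer_instance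

-- ===== CLAIM (what is proved, stated in full; the proofs are below) =====
def Claim_equal_verify_nerve_theorem : Prop := ∀ (cover_sets : List (List Int)), Dom_verify_nerve_theorem cover_sets → Spec_verify_nerve_theorem cover_sets (verify_nerve_theorem cover_sets)

-- ===== LEMMAS AND PROOFS =====

theorem pvCombos_mem {xs : List Nat} {k : Nat} {s : List Nat}
    (h : s ∈ pvCombos xs k) : s.length = k ∧ s ⊆ xs := by
  induction xs generalizing k s with
  | nil =>
    cases k with
    | zero => simp [pvCombos] at h; simp [h]
    | succ k => simp [pvCombos] at h
  | cons x xs ih =>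
    cases k with
    | zero => simp [pvCombos] at h; simp [h]
    | succ k =>
      simp only [pvCombos, List.mem_append, List.mem_map] at h
      rcases h with ⟨t, ht, rfl⟩ | h
      · obtain ⟨hl, hs⟩ := ih ht
        constructor
        · simp [hl]
        · intro a ha
          rcases List.mem_cons.mp ha with rfl | ha
          · exact List.mem_cons_self
          · exact List.mem_cons_of_mem _ (hs ha)
      · obtain ⟨hl, hs⟩ := ih h
        exact ⟨hl, fun a ha => List.mem_cons_of_mem _ (hs ha)⟩

theorem mem_pvCombos_one {xs : List Nat} {i : Nat} (h : i ∈ xs) :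
    [i] ∈ pvCombos xs 1 := by
  induction xs with
  | nil => simp at h
  | cons x xs ih =>
    simp only [pvCombos, List.mem_append, List.mem_map]
    rcases List.mem_cons.mp h with rfl | h
    · left; exact ⟨[], by simp, rfl⟩
    · right; exact ih h

theorem pvInter_singleton (cover : List (List Int)) (i : Nat) :
    pvInter cover [i] = PySem.Set.ofList (cover.getD i []) := by
  simp [pvInter]

theorem pvKey (cover : List (List Int)) :
    (∃ k ∈ List.range' 1 cover.length, ∃ subset ∈ pvCombos (List.range cover.length) k,
        1 < (pvInter cover subset).length)
      ↔ ∃ s ∈ cover, 1 < (PySem.Set.ofList s).length := by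
  constructor
  · rintro ⟨k, hk, subset, hsub, hlen⟩
    obtain ⟨hl, hss⟩ := pvCombos_mem hsub
    have hk1 : 1 ≤ k := (List.mem_range'_1.mp hk).1
    cases subset with
    | nil => simp at hl; omega
    | cons i rest =>
      have hi : i < cover.length := List.mem_range.mp (hss List.mem_cons_self)
      refine ⟨cover.getD i [], ?_, ?_⟩
      · rw [List.getD_eq_getElem cover [] hi]; exact List.getElem_mem hi
      · have hle : (pvInter cover (i :: rest)).length
            ≤ (PySem.Set.ofList (cover.getD i [])).length := by
          simp only [pvInter]; exact List.length_filter_le _ _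
        omega
  · rintro ⟨s, hs, hlen⟩
    obtain ⟨i, hi, rfl⟩ := List.getElem_of_mem hs
    refine ⟨1, ?_, [i], mem_pvCombos_one (List.mem_range.mpr hi), ?_⟩
    · exact List.mem_range'_1.mpr ⟨le_refl 1, by omega⟩
    · rw [pvInter_singleton, List.getD_eq_getElem cover [] hi]
      exact hlen

-- A returns False exactly when some set in the cover has two distinct elements
theorem pvA_false_iff (cover : List (List Int)) :
    verify_nerve_theorem cover = false ↔ ∃ s ∈ cover, 1 < (PySem.Set.ofList s).length := by
  unfold verify_nerve_theorem
  rw [Bool.not_eq_false']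
  simp only [List.any_eq_true, decide_eq_true_eq]
  exact pvKey cover

-- ===== VERDICT (by name: the statement is the Claim_ definition above) =====
theorem verify_nerve_theorem_spec : Claim_equal_verify_nerve_theorem := by
  intro cover _
  unfold Spec_verify_nerve_theorem
  cases hB : verify_nerve_theorem_alt cover with
  | false =>
      have hex : ∃ s ∈ cover, 1 < (PySem.Set.ofList s).length := by
        simp only [verify_nerve_theorem_alt, List.all_eq_false, decide_eq_true_eq,
          not_le] at hB
        exact hB
      exact (pvA_false_iff cover).mpr hex
  | true =>
      by_contra h
      rw [Bool.not_eq_true] at h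
      obtain ⟨s, hs, hlen⟩ := (pvA_false_iff cover).mp h
      simp only [verify_nerve_theorem_alt, List.all_eq_true, decide_eq_true_eq] at hB
      have := hB s hs
      omega
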